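-- pv_equiv track=rewrite | github.com/xiuazo/tagWorker | scripts/fileCollision.py | find_duplicate_files
-- ===== SOURCE A (Python) =====
-- def find_duplicate_files(torrents):
--     """Encuentra torrents que apuntan al mismo archivo en el disco duro."""
--     file_paths = {}
--     duplicates = {}
--
--     for torrent in torrents:
--         # Extraemos la ruta completa del archivo o carpeta del torrent
--         save_path = torrent.get("save_path", "")
--         if not save_path.endswith("/") and not save_path.endswith("\\"):
--             save_path += "/"
--         name = torrent.get("name", "")
--
--         # Ruta completa del archivo/carpeta
--         full_path = save_path + name
--
--         if full_path in file_paths: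
--             if full_path not in duplicates:
--                 duplicates[full_path] = [file_paths[full_path]]
--             duplicates[full_path].append(torrent)
--         else:
--             file_paths[full_path] = torrent
--
--     # Ordenar duplicados por clave alfabética
--     return {k: duplicates[k] for k in sorted(duplicates)}
-- ===== SOURCE B (Python) =====
-- def _full_path(torrent):
--     save_path = torrent.get("save_path", "")
--     if not save_path.endswith("/") and not save_path.endswith("\\"):
--         save_path += "/"
--     return save_path + torrent.get("name", "")
--
--
-- def find_duplicate_files(torrents):
--     """Encuentra torrents que apuntan al mismo archivo en el disco duro."""
--     result = {}
--     for path in sorted({_full_path(t) for t in torrents}):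
--         matching = [t for t in torrents if _full_path(t) == path]
--         if len(matching) > 1:
--             result[path] = matching
--     return result
-- ===== Notes on version B (the rewrite author's own statement) =====
-- stated objective: alternative
-- what changed: Replaces A's single-pass two-dict first-seen/duplicates bookkeeping with staged passes: first compute the sorted set of distinct full paths, then rescan the torrent list once per path to collect its group, keeping groups of size > 1.
import Mathlib
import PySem

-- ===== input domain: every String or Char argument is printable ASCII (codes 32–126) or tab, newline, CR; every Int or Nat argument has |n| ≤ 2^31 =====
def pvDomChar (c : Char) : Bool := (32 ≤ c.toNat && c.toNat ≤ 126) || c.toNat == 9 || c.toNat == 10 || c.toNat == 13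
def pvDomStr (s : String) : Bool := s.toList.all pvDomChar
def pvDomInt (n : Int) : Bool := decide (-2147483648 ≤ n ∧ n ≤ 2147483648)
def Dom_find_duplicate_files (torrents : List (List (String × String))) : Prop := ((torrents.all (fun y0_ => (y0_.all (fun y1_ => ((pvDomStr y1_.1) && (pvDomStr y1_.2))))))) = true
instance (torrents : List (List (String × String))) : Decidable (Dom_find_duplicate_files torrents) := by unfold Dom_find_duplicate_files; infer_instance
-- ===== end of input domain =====

-- B replaces A's single-pass two-dict bookkeeping with staged passes: sorted set of
-- distinct paths, then one rescan per path keeping groups of size > 1 (objective: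
-- alternative); return values proved equal.


-- full path of a torrent: save_path normalised to end in '/' or '\', then name appended
-- (shared key computation; both Pythons compute it with the same steps)
def pvFullPath (torrent : List (String × String)) : String :=
  let save_path := (PySem.Dict.mk torrent).getD "save_path" ""
  let save_path :=
    if !(PySem.Str.endswith save_path "/") && !(PySem.Str.endswith save_path "\\") then
      save_path ++ "/"
    else save_path
  save_path ++ (PySem.Dict.mk torrent).getD "name" ""

-- ===== PORT A =====
-- A's loop body: update (file_paths, duplicates) with one torrent
def pvStepA
    (st : PySem.Dict String (List (String × String)) × PySem.Dict String (List (List (String × String))))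
    (torrent : List (String × String)) :
    PySem.Dict String (List (String × String)) × PySem.Dict String (List (List (String × String))) :=
  let file_paths := st.1
  let duplicates := st.2
  let full_path := pvFullPath torrent
  if file_paths.contains full_path then
    let duplicates :=
      if !(duplicates.contains full_path) then
        duplicates.insert full_path [file_paths.getD full_path []]
      else duplicates
    (file_paths, duplicates.modify full_path [] (fun l => l ++ [torrent]))
  else
    (file_paths.insert full_path torrent, duplicates)

def find_duplicate_files (torrents : List (List (String × String))) : List (String × List (List (String × String))) :=
  let st := torrents.foldl pvStepA (PySem.Dict.empty, PySem.Dict.empty)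
  (PySem.List.sorted st.2.keys (fun k => k)).map (fun k => (k, st.2.getD k []))

-- ===== PORT B =====
-- B: sorted distinct paths, then for each path one rescan of torrents collecting
-- its group; groups of size > 1 are appended to the result
def find_duplicate_files_alt (torrents : List (List (String × String))) : List (String × List (List (String × String))) :=
  let paths := PySem.List.sorted (PySem.Set.ofList (torrents.map pvFullPath)) (fun k => k)
  paths.foldl (fun result path =>
    let matching := torrents.filter (fun t => pvFullPath t == path)
    if 1 < matching.length then result ++ [(path, matching)] else result) []

-- ===== PRECONDITION & SPEC =====
def Spec_find_duplicate_files (torrents : List (List (String × String))) (out : List (String × List (List (String × String)))) : Prop := out = find_duplicate_files_alt torrents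
instance (torrents : List (List (String × String))) (out : List (String × List (List (String × String)))) : Decidable (Spec_find_duplicate_files torrents out) := by unfold Spec_find_duplicate_files; infer_instance

-- ===== CLAIM (what is proved, stated in full; the proofs are below) =====
def Claim_equal_find_duplicate_files : Prop := ∀ (torrents : List (List (String × String))), Dom_find_duplicate_files torrents → Spec_find_duplicate_files torrents (find_duplicate_files torrents)

-- ===== LEMMAS AND PROOFS =====

-- the group of torrents of a list l that share the path k (proof-only ghost)
def pvGrp (l : List (List (String × String))) (k : String) : List (List (String × String)) :=
  l.filter (fun t => pvFullPath t == k)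

theorem pvGrp_append_singleton (l : List (List (String × String))) (t : List (String × String)) (k : String) :
    pvGrp (l ++ [t]) k = if pvFullPath t = k then pvGrp l k ++ [t] else pvGrp l k := by
  simp only [pvGrp, List.filter_append]
  by_cases h : pvFullPath t = k
  · simp [h]
  · have hb : (pvFullPath t == k) = false := by simp [h]
    simp [hb, h]

-- the invariant linking A's (file_paths, duplicates) state after the prefix l
-- with the per-path groups of l
def pvInv (l : List (List (String × String)))
    (fps : PySem.Dict String (List (String × String)))
    (dups : PySem.Dict String (List (List (String × String)))) : Prop :=
  (∀ k, fps.get? k = (pvGrp l k).head?) ∧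
  (∀ k, dups.get? k = if 2 ≤ (pvGrp l k).length then some (pvGrp l k) else none) ∧
  dups.keys.Nodup

theorem pvInv_empty : pvInv [] PySem.Dict.empty PySem.Dict.empty := by
  refine ⟨fun k => ?_, fun k => ?_, PySem.Dict.nodup_keys_empty⟩ <;>
    simp [pvGrp, PySem.Dict.get?_empty]

theorem pvInv_step (l : List (List (String × String)))
    (fps : PySem.Dict String (List (String × String)))
    (dups : PySem.Dict String (List (List (String × String))))
    (h : pvInv l fps dups) (t : List (String × String)) :
    pvInv (l ++ [t]) (pvStepA (fps, dups) t).1 (pvStepA (fps, dups) t).2 := by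
  obtain ⟨hc, hd, hndD⟩ := h
  set p := pvFullPath t with hp
  have hG : ∀ k, pvGrp (l ++ [t]) k = if k = p then pvGrp l p ++ [t] else pvGrp l k := by
    intro k
    rw [pvGrp_append_singleton]
    by_cases hk : k = p
    · subst hk; rw [if_pos hp.symm]
    · rw [if_neg (fun hh => hk hh.symm), if_neg hk]
  by_cases hfp : fps.contains p = true
  · -- p was seen before: l's group at p is nonempty
    have hne : pvGrp l p ≠ [] := by
      intro hnil
      have := hc p
      rw [hnil] at this
      simp [PySem.Dict.contains_eq_isSome_get?, this] at hfp
    refine ⟨fun k => ?_, fun k => ?_, ?_⟩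
    · -- file_paths unchanged, heads unchanged
      rw [hG k]
      by_cases hk : k = p
      · subst hk
        rw [if_pos rfl, List.head?_append_of_ne_nil _ hne]
        simpa [pvStepA, hfp, ← hp] using hc p
      · rw [if_neg hk]
        simpa [pvStepA, hfp, ← hp] using hc k
    · -- duplicates updated at p
      have hstep : (pvStepA (fps, dups) t).2.get? k =
          if k = p then
            some ((if !(dups.contains p) then dups.insert p [fps.getD p []] else dups).getD p [] ++ [t])
          else (if !(dups.contains p) then dups.insert p [fps.getD p []] else dups).get? k := by
        simp [pvStepA, hfp, ← hp, PySem.Dict.modify, PySem.Dict.get?_insert]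
      rw [hstep, hG k]
      by_cases hk : k = p
      · subst hk
        rw [if_pos rfl, if_pos rfl]
        by_cases hdp : dups.contains p = true
        · -- already a duplicate: 2 ≤ len, dups holds the full group
          have h2 : dups.get? p = some (pvGrp l p) ∧ 2 ≤ (pvGrp l p).length := by
            by_cases hl : 2 ≤ (pvGrp l p).length
            · exact ⟨by rw [hd p, if_pos hl], hl⟩
            · exfalso
              have := hd p
              rw [if_neg hl] at this
              simp [PySem.Dict.contains_eq_isSome_get?, this] at hdp
          rw [if_neg (by simp [hdp]), if_pos (by simp [List.length_append]; omega),
            PySem.Dict.getD_eq_get?_getD, h2.1]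
          simp
        · -- second occurrence: group had exactly one element
          have hcf : dups.contains p = false := by simpa using hdp
          have hnone : dups.get? p = none := by
            rw [PySem.Dict.contains_eq_isSome_get?] at hcf
            exact Option.not_isSome_iff_eq_none.mp (by simp [hcf])
          have hlen1 : ¬ 2 ≤ (pvGrp l p).length := by
            intro hl; rw [hd p, if_pos hl] at hnone; simp at hnone
          obtain ⟨x, hx⟩ : ∃ x, pvGrp l p = [x] := by
            rcases hgl : pvGrp l p with _ | ⟨x, _ | ⟨y, l'⟩⟩
            · exact absurd hgl hne
            · exact ⟨x, rfl⟩
            · exfalso; rw [hgl] at hlen1; simp at hlen1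
          have hfx : fps.getD p [] = x := by
            rw [PySem.Dict.getD_eq_get?_getD, hc p, hx]; rfl
          rw [if_pos (by simp [hdp]), PySem.Dict.getD_eq_get?_getD,
            PySem.Dict.get?_insert, if_pos rfl, if_pos (by rw [hx]; simp)]
          simp [hfx, hx]
      · rw [if_neg hk, if_neg hk]
        by_cases hdp : dups.contains p = true
        · rw [if_neg (by simp [hdp])]; exact hd k
        · rw [if_pos (by simp [hdp]), PySem.Dict.get?_insert, if_neg hk]; exact hd k
    · -- nodup of duplicates' keys
      have : (pvStepA (fps, dups) t).2 =
          ((if !(dups.contains p) then dups.insert p [fps.getD p []] else dups).insert p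
            ((if !(dups.contains p) then dups.insert p [fps.getD p []] else dups).getD p [] ++ [t])) := by
        simp [pvStepA, hfp, ← hp, PySem.Dict.modify]
      rw [this]
      apply PySem.Dict.nodup_keys_insert
      by_cases hdp : dups.contains p = true
      · simpa [hdp] using hndD
      · rw [if_pos (by simp [hdp])]; exact PySem.Dict.nodup_keys_insert _ _ _ hndD
  · -- first occurrence of p
    have hnil : pvGrp l p = [] := by
      have := hc p
      rcases hgl : pvGrp l p with _ | ⟨x, l'⟩
      · rfl
      · exfalso
        rw [hgl] at this
        simp [PySem.Dict.contains_eq_isSome_get?, this] at hfp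
    refine ⟨fun k => ?_, fun k => ?_, by simpa [pvStepA, hfp, ← hp] using hndD⟩
    · rw [hG k]
      by_cases hk : k = p
      · subst hk
        rw [if_pos rfl, hnil]
        simp [pvStepA, hfp, ← hp]
      · rw [if_neg hk]
        simpa [pvStepA, hfp, ← hp, PySem.Dict.get?_insert, hk] using hc k
    · rw [hG k]
      by_cases hk : k = p
      · subst hk
        rw [if_pos rfl, hnil]
        have := hd p
        rw [hnil, if_neg (by simp)] at this
        simpa [pvStepA, hfp, ← hp] using this
      · rw [if_neg hk]
        simpa [pvStepA, hfp, ← hp] using hd k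

theorem pvInv_fold (rest l : List (List (String × String)))
    (fps : PySem.Dict String (List (String × String)))
    (dups : PySem.Dict String (List (List (String × String))))
    (h : pvInv l fps dups) :
    pvInv (l ++ rest) (rest.foldl pvStepA (fps, dups)).1 (rest.foldl pvStepA (fps, dups)).2 := by
  induction rest generalizing l fps dups with
  | nil => simpa using h
  | cons t rest ih =>
    have hstep := pvInv_step l fps dups h t
    have := ih (l ++ [t]) (pvStepA (fps, dups) t).1 (pvStepA (fps, dups) t).2 hstep
    simpa [List.append_assoc] using this

theorem find_duplicate_files_spec : Claim_equal_find_duplicate_files := by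
  intro torrents _
  unfold Spec_find_duplicate_files find_duplicate_files find_duplicate_files_alt
  obtain ⟨hc, hd, hndD⟩ := by
    simpa using pvInv_fold torrents [] PySem.Dict.empty PySem.Dict.empty pvInv_empty
  set dups := (torrents.foldl pvStepA (PySem.Dict.empty, PySem.Dict.empty)).2 with hdups
  set paths := PySem.List.sorted (PySem.Set.ofList (torrents.map pvFullPath)) (fun k => k) with hpaths
  -- B's loop is filter-then-map over paths
  rw [PySem.List.foldl_append_ite
    (p := fun path => 1 < (torrents.filter (fun t => pvFullPath t == path)).length)
    (f := fun path => (path, torrents.filter (fun t => pvFullPath t == path)))]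
  set L := paths.filter (fun path => decide (1 < (torrents.filter (fun t => pvFullPath t == path)).length)) with hL
  -- membership in dups.keys ↔ a group of size ≥ 2
  have hmem : ∀ k, k ∈ dups.keys ↔ 2 ≤ (pvGrp torrents k).length := by
    intro k
    rw [← PySem.Dict.contains_iff_mem_keys, PySem.Dict.contains_eq_isSome_get?, hd k]
    by_cases h2 : 2 ≤ (pvGrp torrents k).length
    · simp [h2]
    · simp [h2]
  have hpathsLt : paths.Pairwise (fun a b : String => a < b) :=
    PySem.List.sorted_ofList_pairwise_lt (torrents.map pvFullPath)
  have hLlt : L.Pairwise (fun a b : String => a < b) := hpathsLt.filter _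
  have hLnd : L.Nodup := hLlt.imp (fun h => ne_of_lt h)
  have hperm : L.Perm dups.keys := by
    rw [List.perm_ext_iff_of_nodup hLnd hndD]
    intro k
    rw [hmem k, hL, List.mem_filter]
    constructor
    · rintro ⟨_, h2⟩
      have := of_decide_eq_true h2
      simp only [pvGrp]
      omega
    · intro h2
      refine ⟨?_, decide_eq_true (show 1 < _ by simp only [pvGrp] at h2; omega)⟩
      -- the group is nonempty, so k occurs among the mapped paths
      obtain ⟨t, htmem, htk⟩ : ∃ t ∈ torrents, (pvFullPath t == k) = true := by
        rcases hgl : pvGrp torrents k with _ | ⟨t, _⟩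
        · rw [hgl] at h2; simp at h2
        · have ht : t ∈ pvGrp torrents k := by rw [hgl]; exact List.mem_cons_self
          have := List.mem_filter.mp ht
          exact ⟨t, this.1, this.2⟩
      have hkmem : k ∈ torrents.map pvFullPath := by
        refine List.mem_map.mpr ⟨t, htmem, ?_⟩
        exact of_decide_eq_true htk
      rw [hpaths, PySem.List.mem_sorted]
      exact (PySem.Set.mem_ofList _ _).mpr hkmem
  have hsorted : PySem.List.sorted dups.keys (fun k => k) = L :=
    PySem.List.sorted_eq_of_perm_of_pairwise_lt dups.keys L (fun k => k) hperm hLlt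
  show (PySem.List.sorted dups.keys fun k => k).map (fun k => (k, dups.getD k [])) =
    [] ++ List.map (fun path => (path, torrents.filter (fun t => pvFullPath t == path))) L
  rw [hsorted]
  simp only [List.nil_append]
  apply List.map_congr_left
  intro k hk
  have h2 : 2 ≤ (pvGrp torrents k).length := (hmem k).mp ((hperm.mem_iff).mp hk)
  have := hd k
  rw [if_pos h2] at this
  rw [PySem.Dict.getD_eq_get?_getD, this]
  rfl
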